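-- pv_equiv track=rewrite | github.com/jewerlykim/python_Algorithm | COTE2/1.py | solution
-- ===== SOURCE A (Python) =====
-- def solution(U, L, C):
--     if C == []:
--         return "IMPOSSIBLE"
--     length = len(C)
--     number_array = [[0 for _ in range(length)] for _ in range(2)]
--
--     for i in range(length):
--         if C[i] == 2:
--             if U > 0 and L > 0 :
--                 number_array[0][i], number_array[1][i] = 1, 1
--                 U -= 1
--                 L -= 1
--             else:
--                 return "IMPOSSIBLE"
--         else:
--             continue
--
--     for i in range(length):
--         if C[i] == 1:
--             if U > 0:
--                 number_array[0][i] = 1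
--                 U -= 1
--             else:
--                 if L > 0 :
--                     number_array[1][i] = 1
--                     L -= 1
--                 else:
--                     return "IMPOSSIBLE"
--
--     if U > 0 or L > 0 :
--         return "IMPOSSIBLE"
--     else:
--         answer = ''.join(list(map(str, number_array[0]))) + ',' + ''.join(list(map(str, number_array[1])))
--         return answer
-- ===== SOURCE B (Python) =====
-- def solution(U, L, C):
--     twos = C.count(2)
--     ones = C.count(1)
--     if not C or twos > U or twos > L or ones != (U - twos) + (L - twos):
--         return "IMPOSSIBLE"
--     rem = U - twos
--     top = []
--     bot = []
--     for c in C: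
--         if c == 2:
--             top.append('1')
--             bot.append('1')
--         elif c == 1:
--             if rem > 0:
--                 top.append('1')
--                 bot.append('0')
--                 rem -= 1
--             else:
--                 top.append('0')
--                 bot.append('1')
--         else:
--             top.append('0')
--             bot.append('0')
--     return ''.join(top) + ',' + ''.join(bot)
-- ===== Notes on version B (the rewrite author's own statement) =====
-- stated objective: alternative
-- what changed: Replaces A's two mutating passes over a 2xN zero matrix with a counting pass plus a closed-form feasibility test (twos fit under both caps and the ones exactly fill the remaining capacity) and a single construction pass that builds both row strings directly, assigning the first U-twos ones to the top row.
-- intended difference: When U or L is negative, C has no 2s and the number of 1s equals max(U,0)+max(L,0), A's leftover check 'U > 0 or L > 0' misses the negative cap and A returns an assignment string despite the negative required count; B returns IMPOSSIBLE, the intended answer since a negative capacity can never be satisfied exactly. — e.g. on solution(-1, 1, [1]): A returns "0,1", B returns "IMPOSSIBLE"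
import Mathlib
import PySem

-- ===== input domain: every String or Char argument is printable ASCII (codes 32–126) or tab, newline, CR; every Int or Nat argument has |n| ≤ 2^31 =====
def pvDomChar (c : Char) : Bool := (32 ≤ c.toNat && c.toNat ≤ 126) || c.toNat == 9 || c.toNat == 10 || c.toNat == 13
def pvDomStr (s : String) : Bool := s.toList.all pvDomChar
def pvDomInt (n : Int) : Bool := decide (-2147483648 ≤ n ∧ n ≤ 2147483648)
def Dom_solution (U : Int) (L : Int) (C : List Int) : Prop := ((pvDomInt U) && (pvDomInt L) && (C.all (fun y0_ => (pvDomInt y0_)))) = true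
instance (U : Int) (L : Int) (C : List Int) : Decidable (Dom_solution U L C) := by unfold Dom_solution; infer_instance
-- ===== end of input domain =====

-- B replaces A's two mutating passes over a 2xN zero matrix by a counting pass, a closed-form
-- feasibility test and a single construction pass building both rows (objective: alternative);
-- on negative caps with no 2-columns A can return an assignment string, B says IMPOSSIBLE (D_ below).

-- ===== PORT A =====
-- A's first for-loop: consumes the 2-columns, writing 1/1 into both rows (none = early "IMPOSSIBLE" return)
def pvPass1_solution : List Int → Int → Int → Option (Int × Int × List Int × List Int)
  | [], U, L => some (U, L, [], [])
  | c :: cs, U, L =>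
    if c = 2 then
      if U > 0 ∧ L > 0 then
        match pvPass1_solution cs (U - 1) (L - 1) with
        | none => none
        | some (U', L', a0, a1) => some (U', L', 1 :: a0, 1 :: a1)
      else none
    else
      match pvPass1_solution cs U L with
      | none => none
      | some (U', L', a0, a1) => some (U', L', 0 :: a0, 0 :: a1)

-- A's second for-loop: consumes the 1-columns, preferring the upper row while U > 0
def pvPass2_solution : List Int → List Int → List Int → Int → Int → Option (Int × Int × List Int × List Int)
  | c :: cs, x :: xs, y :: ys, U, L =>
    if c = 1 then
      if U > 0 then
        match pvPass2_solution cs xs ys (U - 1) L with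
        | none => none
        | some (U', L', a0, a1) => some (U', L', 1 :: a0, y :: a1)
      else
        if L > 0 then
          match pvPass2_solution cs xs ys U (L - 1) with
          | none => none
          | some (U', L', a0, a1) => some (U', L', x :: a0, 1 :: a1)
        else none
    else
      match pvPass2_solution cs xs ys U L with
      | none => none
      | some (U', L', a0, a1) => some (U', L', x :: a0, y :: a1)
  | _, xs, ys, U, L => some (U, L, xs, ys)

def solution (U : Int) (L : Int) (C : List Int) : String :=
  if C = [] then "IMPOSSIBLE"
  else
    match pvPass1_solution C U L with
    | none => "IMPOSSIBLE"
    | some (U1, L1, a0, a1) =>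
      match pvPass2_solution C a0 a1 U1 L1 with
      | none => "IMPOSSIBLE"
      | some (U2, L2, b0, b1) =>
        if U2 > 0 ∨ L2 > 0 then "IMPOSSIBLE"
        else PySem.Str.join "" (b0.map PySem.Int.toStr) ++ "," ++ PySem.Str.join "" (b1.map PySem.Int.toStr)

-- ===== PORT B =====
-- B's single construction pass: both rows as char lists, rem = free upper slots left for 1-columns
def pvBuild_solution : List Int → Int → List Char × List Char
  | [], _ => ([], [])
  | c :: cs, rem =>
    if c = 2 then
      ('1' :: (pvBuild_solution cs rem).1, '1' :: (pvBuild_solution cs rem).2)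
    else if c = 1 then
      if rem > 0 then
        ('1' :: (pvBuild_solution cs (rem - 1)).1, '0' :: (pvBuild_solution cs (rem - 1)).2)
      else
        ('0' :: (pvBuild_solution cs rem).1, '1' :: (pvBuild_solution cs rem).2)
    else
      ('0' :: (pvBuild_solution cs rem).1, '0' :: (pvBuild_solution cs rem).2)

def solution_alt (U : Int) (L : Int) (C : List Int) : String :=
  let twos : Int := PySem.List.count C 2
  let ones : Int := PySem.List.count C 1
  if C = [] ∨ twos > U ∨ twos > L ∨ ones ≠ (U - twos) + (L - twos) then "IMPOSSIBLE"
  else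
    String.ofList (pvBuild_solution C (U - twos)).1 ++ "," ++ String.ofList (pvBuild_solution C (U - twos)).2

-- ===== PRECONDITION & SPEC =====
-- When U or L is negative, C has no 2s and the 1-count equals max(U,0)+max(L,0), A's leftover check
-- 'U > 0 or L > 0' misses the negative cap and A returns an assignment string despite the negative
-- required count; B returns "IMPOSSIBLE", the intended answer since a negative capacity cannot be met.
def D_solution (U : Int) (L : Int) (C : List Int) : Prop :=
  C ≠ [] ∧ (U < 0 ∨ L < 0) ∧ (PySem.List.count C 2 : Int) = 0 ∧
    (PySem.List.count C 1 : Int) = max U 0 + max L 0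
instance (U : Int) (L : Int) (C : List Int) : Decidable (D_solution U L C) := by unfold D_solution; infer_instance

def Spec_solution (U : Int) (L : Int) (C : List Int) (out : String) : Prop := ¬ D_solution U L C → out = solution_alt U L C
instance (U : Int) (L : Int) (C : List Int) (out : String) : Decidable (Spec_solution U L C out) := by unfold Spec_solution; infer_instance

def pvDiffWitness_solution : Int × Int × List Int := (-1, 1, [1])
def pvDiffWitnessOut_solution : String × String := ("0,1", "IMPOSSIBLE")

-- ===== CLAIM =====
def Claim_unchanged_solution : Prop := ∀ (U : Int) (L : Int) (C : List Int), Dom_solution U L C → Spec_solution U L C (solution U L C)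
def Claim_changed_solution : Prop := Dom_solution (pvDiffWitness_solution.1) (pvDiffWitness_solution.2.1) (pvDiffWitness_solution.2.2) ∧ D_solution (pvDiffWitness_solution.1) (pvDiffWitness_solution.2.1) (pvDiffWitness_solution.2.2) ∧ solution (pvDiffWitness_solution.1) (pvDiffWitness_solution.2.1) (pvDiffWitness_solution.2.2) = pvDiffWitnessOut_solution.1 ∧ solution_alt (pvDiffWitness_solution.1) (pvDiffWitness_solution.2.1) (pvDiffWitness_solution.2.2) = pvDiffWitnessOut_solution.2 ∧ pvDiffWitnessOut_solution.1 ≠ pvDiffWitnessOut_solution.2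
def Claim_exact_solution : Prop := ∀ (U : Int) (L : Int) (C : List Int), Dom_solution U L C → D_solution U L C → solution U L C ≠ solution_alt U L C

-- ===== LEMMAS AND PROOFS =====

-- Int-valued analogue of pvBuild_solution: the shape of A's matrix rows after both passes
def rowsA : List Int → Int → List Int × List Int
  | [], _ => ([], [])
  | c :: cs, rem =>
    if c = 2 then
      (1 :: (rowsA cs rem).1, 1 :: (rowsA cs rem).2)
    else if c = 1 then
      if rem > 0 then
        (1 :: (rowsA cs (rem - 1)).1, 0 :: (rowsA cs (rem - 1)).2)
      else
        (0 :: (rowsA cs rem).1, 1 :: (rowsA cs rem).2)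
    else
      (0 :: (rowsA cs rem).1, 0 :: (rowsA cs rem).2)

-- A's first pass succeeds iff the 2-count fits under both caps (or is zero), consuming it from both
lemma pass1_eq (C : List Int) : ∀ U L : Int,
    pvPass1_solution C U L =
      if ((PySem.List.count C 2 : Int) = 0 ∨ ((PySem.List.count C 2 : Int) ≤ U ∧ (PySem.List.count C 2 : Int) ≤ L))
      then some (U - PySem.List.count C 2, L - PySem.List.count C 2,
                 C.map (fun c => if c = 2 then (1 : Int) else 0),
                 C.map (fun c => if c = 2 then (1 : Int) else 0))
      else none := by
  induction C with
  | nil => intro U L; simp [pvPass1_solution, PySem.List.count_eq]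
  | cons c cs ih =>
    intro U L
    have ht : (0:Int) ≤ (PySem.List.count cs 2 : Int) := Int.natCast_nonneg _
    by_cases hc : c = 2
    · subst hc
      have hcount : ((PySem.List.count ((2:Int) :: cs) 2 : Int)) = (PySem.List.count cs 2 : Int) + 1 := by
        simp [PySem.List.count_eq]
      by_cases hUL : U > 0 ∧ L > 0
      · simp only [pvPass1_solution, eq_self_iff_true, if_true, if_pos hUL, ih (U - 1) (L - 1), hcount]
        split_ifs
        · simp only [Option.some.injEq, Prod.mk.injEq]
          refine ⟨by omega, by omega, by norm_num, by norm_num⟩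
        · exfalso; omega
        · exfalso; omega
        · rfl
      · simp only [pvPass1_solution, eq_self_iff_true, if_true, if_neg hUL, hcount]
        split_ifs
        all_goals first | rfl | (exfalso; omega)
    · have hcount : ((PySem.List.count ((c:Int) :: cs) 2 : Int)) = (PySem.List.count cs 2 : Int) := by
        simp [PySem.List.count_eq, List.count_cons, hc]
      simp only [pvPass1_solution, if_neg hc, ih U L, hcount]
      split_ifs with h1
      · simp [hc]
      · rfl

-- A's second pass, started on the rows the first pass leaves: succeeds iff the 1-count fits in the
-- combined free capacity, assigning the first max(U,0) ones to the upper row (= rowsA C U)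
lemma pass2_eq (C : List Int) : ∀ U L : Int,
    pvPass2_solution C (C.map (fun c => if c = 2 then (1 : Int) else 0))
                       (C.map (fun c => if c = 2 then (1 : Int) else 0)) U L =
      if ((PySem.List.count C 1 : Int) ≤ max U 0 + max L 0) then
        some (U - min (PySem.List.count C 1 : Int) (max U 0),
              L - ((PySem.List.count C 1 : Int) - min (PySem.List.count C 1 : Int) (max U 0)),
              (rowsA C U).1, (rowsA C U).2)
      else none := by
  induction C with
  | nil => intro U L; simp [pvPass2_solution, rowsA, PySem.List.count_eq]; omega
  | cons c cs ih =>
    intro U L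
    have ht : (0:Int) ≤ (PySem.List.count cs 1 : Int) := Int.natCast_nonneg _
    by_cases hc : c = 1
    · subst hc
      have hcount : ((PySem.List.count ((1:Int) :: cs) 1 : Int)) = (PySem.List.count cs 1 : Int) + 1 := by
        simp [PySem.List.count_eq]
      have hc2 : ((1:Int) = 2) = False := by norm_num
      by_cases hU : U > 0
      · simp only [pvPass2_solution, List.map_cons, hc2, if_false, if_true,
          if_pos hU, ih (U - 1) L, hcount, rowsA]
        split_ifs
        · simp only [Option.some.injEq, Prod.mk.injEq, and_true]
          omega
        · exfalso; omega
        · exfalso; omega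
        · rfl
      · by_cases hL : L > 0
        · simp only [pvPass2_solution, List.map_cons, hc2, if_false, if_true,
            if_neg hU, if_pos hL, ih U (L - 1), hcount, rowsA]
          split_ifs
          · simp only [Option.some.injEq, Prod.mk.injEq, and_true]
            omega
          · exfalso; omega
          · exfalso; omega
          · rfl
        · simp only [pvPass2_solution, List.map_cons, hc2, if_false, if_true,
            if_neg hU, if_neg hL, hcount]
          split_ifs
          · exfalso; omega
          · rfl
    · have hcount : ((PySem.List.count ((c:Int) :: cs) 1 : Int)) = (PySem.List.count cs 1 : Int) := by
        simp [PySem.List.count_eq, List.count_cons, hc]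
      by_cases hc2 : c = 2
      · subst hc2
        have hc1 : ((2:Int) = 1) = False := by norm_num
        simp only [pvPass2_solution, List.map_cons, hc1, if_false, eq_self_iff_true, if_true,
          ih U L, hcount, rowsA]
        split_ifs
        · rfl
        · rfl
      · simp only [pvPass2_solution, List.map_cons, if_neg hc, if_neg hc2, ih U L, hcount, rowsA]
        split_ifs
        · rfl
        · rfl

-- rowsA's entries rendered by str() are exactly pvBuild_solution's characters
lemma rows_build_chars (C : List Int) : ∀ rem : Int,
    (rowsA C rem).1.map PySem.Int.toStr = (pvBuild_solution C rem).1.map (fun ch => String.ofList [ch]) ∧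
    (rowsA C rem).2.map PySem.Int.toStr = (pvBuild_solution C rem).2.map (fun ch => String.ofList [ch]) := by
  have h1 : PySem.Int.toStr 1 = String.ofList ['1'] := by decide
  have h0 : PySem.Int.toStr 0 = String.ofList ['0'] := by decide
  induction C with
  | nil => intro rem; simp [rowsA, pvBuild_solution]
  | cons c cs ih =>
    intro rem
    by_cases hc : c = 2
    · simp [rowsA, pvBuild_solution, hc, (ih rem).1, (ih rem).2, h1]
    · by_cases hc1 : c = 1
      · by_cases hr : rem > 0
        · simp [rowsA, pvBuild_solution, hc, hc1, hr, (ih (rem - 1)).1, (ih (rem - 1)).2, h1, h0]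
        · simp [rowsA, pvBuild_solution, hc, hc1, hr, (ih rem).1, (ih rem).2, h1, h0]
      · simp [rowsA, pvBuild_solution, hc, hc1, (ih rem).1, (ih rem).2, h0]

-- ''.join over one-character strings is the string of the characters
lemma join_singletons (chars : List Char) :
    PySem.Str.join "" (chars.map (fun ch => String.ofList [ch])) = String.ofList chars := by
  apply String.toList_inj.mp
  rw [PySem.Str.toList_join]
  have h : (chars.map (fun ch => String.ofList [ch])).map String.toList = chars.map (fun c => [c]) := by
    simp
  rw [h]
  have h2 : ("" : String).toList = [] := rfl
  rw [h2, PySem.Chars.join_nil_singletons]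
  simp

lemma rows_build (C : List Int) (rem : Int) :
    PySem.Str.join "" ((rowsA C rem).1.map PySem.Int.toStr) = String.ofList (pvBuild_solution C rem).1 ∧
    PySem.Str.join "" ((rowsA C rem).2.map PySem.Int.toStr) = String.ofList (pvBuild_solution C rem).2 := by
  rw [(rows_build_chars C rem).1, (rows_build_chars C rem).2, join_singletons, join_singletons]
  exact ⟨rfl, rfl⟩

-- both rows have one character per column
lemma build_len (C : List Int) : ∀ rem : Int,
    (pvBuild_solution C rem).1.length = C.length ∧ (pvBuild_solution C rem).2.length = C.length := by
  induction C with
  | nil => intro rem; simp [pvBuild_solution]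
  | cons c cs ih =>
    intro rem
    by_cases hc : c = 2
    · simp [pvBuild_solution, hc, (ih rem).1, (ih rem).2]
    · by_cases hc1 : c = 1
      · by_cases hr : rem > 0
        · simp [pvBuild_solution, hc, hc1, hr, (ih (rem - 1)).1, (ih (rem - 1)).2]
        · simp [pvBuild_solution, hc, hc1, hr, (ih rem).1, (ih rem).2]
      · simp [pvBuild_solution, hc, hc1, (ih rem).1, (ih rem).2]

-- A's success value on any input: the two built rows joined by a comma (whenever all three checks pass)
lemma solution_success (U L : Int) (C : List Int) (hC : C ≠ [])
    (h1 : ((PySem.List.count C 2 : Int) = 0 ∨ ((PySem.List.count C 2 : Int) ≤ U ∧ (PySem.List.count C 2 : Int) ≤ L)))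
    (h2 : (PySem.List.count C 1 : Int) ≤ max (U - (PySem.List.count C 2 : Int)) 0 + max (L - (PySem.List.count C 2 : Int)) 0)
    (h3 : ¬ ((U - (PySem.List.count C 2 : Int)) - min (PySem.List.count C 1 : Int) (max (U - (PySem.List.count C 2 : Int)) 0) > 0 ∨
             (L - (PySem.List.count C 2 : Int)) - ((PySem.List.count C 1 : Int) - min (PySem.List.count C 1 : Int) (max (U - (PySem.List.count C 2 : Int)) 0)) > 0)) :
    solution U L C = String.ofList (pvBuild_solution C (U - (PySem.List.count C 2 : Int))).1 ++ "," ++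
                     String.ofList (pvBuild_solution C (U - (PySem.List.count C 2 : Int))).2 := by
  unfold solution
  rw [if_neg hC, pass1_eq C U L, if_pos h1]
  show (match pvPass2_solution C _ _ _ _ with
        | none => "IMPOSSIBLE"
        | some (U2, L2, b0, b1) =>
          if U2 > 0 ∨ L2 > 0 then "IMPOSSIBLE"
          else PySem.Str.join "" (b0.map PySem.Int.toStr) ++ "," ++ PySem.Str.join "" (b1.map PySem.Int.toStr)) = _
  rw [pass2_eq C (U - (PySem.List.count C 2 : Int)) (L - (PySem.List.count C 2 : Int)), if_pos h2]
  show (if _ > (0:Int) ∨ _ > (0:Int) then "IMPOSSIBLE" else _) = _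
  rw [if_neg h3, (rows_build C (U - (PySem.List.count C 2 : Int))).1,
      (rows_build C (U - (PySem.List.count C 2 : Int))).2]

-- ===== VERDICT =====
theorem solution_spec : Claim_unchanged_solution := by
  intro U L C _ hD
  unfold solution solution_alt
  unfold D_solution at hD
  by_cases hC : C = []
  · subst hC; simp
  · have ht : (0:Int) ≤ (PySem.List.count C 2 : Int) := Int.natCast_nonneg _
    have ho : (0:Int) ≤ (PySem.List.count C 1 : Int) := Int.natCast_nonneg _
    rw [if_neg hC, pass1_eq C U L]
    by_cases h1 : ((PySem.List.count C 2 : Int) = 0 ∨ ((PySem.List.count C 2 : Int) ≤ U ∧ (PySem.List.count C 2 : Int) ≤ L))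
    · rw [if_pos h1]
      show (match pvPass2_solution C _ _ _ _ with
            | none => "IMPOSSIBLE"
            | some (U2, L2, b0, b1) =>
              if U2 > 0 ∨ L2 > 0 then "IMPOSSIBLE"
              else PySem.Str.join "" (b0.map PySem.Int.toStr) ++ "," ++ PySem.Str.join "" (b1.map PySem.Int.toStr)) = _
      rw [pass2_eq C (U - (PySem.List.count C 2 : Int)) (L - (PySem.List.count C 2 : Int))]
      by_cases h2 : ((PySem.List.count C 1 : Int) ≤ max (U - (PySem.List.count C 2 : Int)) 0 + max (L - (PySem.List.count C 2 : Int)) 0)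
      · rw [if_pos h2]
        show (if _ > (0:Int) ∨ _ > (0:Int) then "IMPOSSIBLE" else _) = _
        by_cases h3 : ((U - (PySem.List.count C 2 : Int)) - min (PySem.List.count C 1 : Int) (max (U - (PySem.List.count C 2 : Int)) 0) > 0 ∨
                       (L - (PySem.List.count C 2 : Int)) - ((PySem.List.count C 1 : Int) - min (PySem.List.count C 1 : Int) (max (U - (PySem.List.count C 2 : Int)) 0)) > 0)
        · rw [if_pos h3, if_pos (by right; omega)]
        · -- A succeeds: ¬D_ forces U, L ≥ 0, hence B's closed-form test holds with the same rows
          have hcond : ¬ (C = [] ∨ (PySem.List.count C 2 : Int) > U ∨ (PySem.List.count C 2 : Int) > L ∨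
              (PySem.List.count C 1 : Int) ≠ (U - (PySem.List.count C 2 : Int)) + (L - (PySem.List.count C 2 : Int))) := by
            push_neg
            refine ⟨hC, ?_⟩
            by_cases hUL : 0 ≤ U ∧ 0 ≤ L
            · constructor
              · omega
              · constructor
                · omega
                · omega
            · exfalso
              apply hD
              refine ⟨hC, by omega, by omega, by omega⟩
          rw [if_neg h3, if_neg hcond, (rows_build C (U - (PySem.List.count C 2 : Int))).1,
              (rows_build C (U - (PySem.List.count C 2 : Int))).2]
      · rw [if_neg h2, if_pos (by right; right; omega)]
    · rw [if_neg h1, if_pos (by right; omega)]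

theorem solution_changed : Claim_changed_solution := by unfold Claim_changed_solution; decide

theorem solution_tight : Claim_exact_solution := by
  intro U L C _ hD
  obtain ⟨hC, hneg, ht, ho⟩ := hD
  have hBimp : solution_alt U L C = "IMPOSSIBLE" := by
    unfold solution_alt
    rw [if_pos (by right; omega)]
  have hA : solution U L C = String.ofList (pvBuild_solution C (U - (PySem.List.count C 2 : Int))).1 ++ "," ++
      String.ofList (pvBuild_solution C (U - (PySem.List.count C 2 : Int))).2 :=
    solution_success U L C hC (Or.inl ht) (by omega) (by omega)
  rw [hA, hBimp]
  intro heq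
  have hlen := congrArg (fun s => s.toList.length) heq
  have hs : ∀ l : List Char, (String.ofList l).toList = l := fun l => by simp
  simp only [String.toList_append, List.length_append, hs] at hlen
  have l1 := (build_len C (U - (PySem.List.count C 2 : Int))).1
  have l2 := (build_len C (U - (PySem.List.count C 2 : Int))).2
  simp at hlen l1 l2
  omega
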